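-- pv_equiv track=rewrite | github.com/EduardFrlicka/VUT-FIT-BIT | IAM/SAT/8_Queens_Problem/old.py | bishop_clausules_count
-- ===== SOURCE A (Python) =====
-- def bishop_clausules_count(N:int):
--     A, B = N-1, N-1
--     sum = 0
--     while A >= 0:
--         if(A == 0):
--             sum+=B
--             break
--         sum+=A*B*4
--         A-=2
--         B+=2
--     return sum
-- ===== SOURCE B (Python) =====
-- def bishop_clausules_count(N: int):
--     M = N - 1
--     if M < 0:
--         return 0
--     J = (M + 1) // 2                      # number of positive-A iterations
--     s = 4 * J * M * M - 16 * ((J - 1) * J * (2 * J - 1) // 6)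
--     if M % 2 == 0:
--         s += 2 * M
--     return s
-- ===== Notes on version B (the rewrite author's own statement) =====
-- stated objective: faster
-- what changed: Replaced A's O(N) while-loop accumulation with a constant-time closed-form polynomial using the sum-of-squares formula and a parity case split.
import Mathlib
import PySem

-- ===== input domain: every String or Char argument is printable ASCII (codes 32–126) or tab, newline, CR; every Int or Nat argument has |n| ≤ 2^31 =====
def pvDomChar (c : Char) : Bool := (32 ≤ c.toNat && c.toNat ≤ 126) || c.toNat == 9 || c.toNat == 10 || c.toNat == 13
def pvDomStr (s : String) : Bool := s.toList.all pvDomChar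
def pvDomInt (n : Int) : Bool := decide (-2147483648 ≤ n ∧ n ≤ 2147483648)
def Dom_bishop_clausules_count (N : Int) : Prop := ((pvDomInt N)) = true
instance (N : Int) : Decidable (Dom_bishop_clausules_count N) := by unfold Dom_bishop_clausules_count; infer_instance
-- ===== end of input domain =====

-- B replaces A's O(N) while-loop by an O(1) closed-form polynomial (sum-of-squares formula with a parity case split); proved equal for all N.

-- ===== PORT A =====
-- A's while loop: state (A, B, sum); each iteration A -= 2, B += 2; terminates since A decreases.
def bishopLoopA (A B sum : Int) : Int :=
  if _h : A ≥ 0 then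
    if A = 0 then sum + B
    else bishopLoopA (A - 2) (B + 2) (sum + A * B * 4)
  else sum
termination_by A.toNat
decreasing_by omega

def bishop_clausules_count (N : Int) : Int :=
  bishopLoopA (N - 1) (N - 1) 0

-- ===== PORT B =====
def bishop_clausules_count_alt (N : Int) : Int :=
  let M := N - 1
  if M < 0 then 0
  else
    let J := PySem.Int.floordiv (M + 1) 2
    let s := 4 * J * M * M - 16 * PySem.Int.floordiv ((J - 1) * J * (2 * J - 1)) 6
    if PySem.Int.mod M 2 = 0 then s + 2 * M else s

-- ===== PRECONDITION & SPEC =====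
def Spec_bishop_clausules_count (N : Int) (out : Int) : Prop := out = bishop_clausules_count_alt N
instance (N : Int) (out : Int) : Decidable (Spec_bishop_clausules_count N out) := by unfold Spec_bishop_clausules_count; infer_instance

-- ===== CLAIM (what is proved, stated in full; the proofs are below) =====
def Claim_equal_bishop_clausules_count : Prop := ∀ (N : Int), Dom_bishop_clausules_count N → Spec_bishop_clausules_count N (bishop_clausules_count N)

-- ===== LEMMAS AND PROOFS =====

-- Closed description of the remaining work of A's loop, as a finite sum, indexed by A as a Nat.
def bishopRem (a : Nat) (B : Int) : Int :=
  4 * (∑ j ∈ Finset.range ((a + 1) / 2), ((a : Int) - 2 * j) * (B + 2 * j)) +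
    (if a % 2 = 0 then B + a else 0)

theorem bishopLoopA_eq_rem : ∀ (a : Nat) (B sum : Int),
    bishopLoopA (a : Int) B sum = sum + bishopRem a B := by
  intro a
  induction a using Nat.strong_induction_on with
  | _ a ih =>
    intro B sum
    match a with
    | 0 =>
      rw [bishopLoopA]
      simp [bishopRem]
    | 1 =>
      rw [bishopLoopA]
      norm_num [bishopRem, Finset.sum_range_succ]
      rw [bishopLoopA]
      norm_num
      ring
    | (k+2) =>
      rw [bishopLoopA]
      have h1 : ((k:Int) + 2) ≥ 0 := by omega
      have h2 : ¬ ((k:Int) + 2 = 0) := by omega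
      have hc : ((k + 2 : Nat) : Int) = (k : Int) + 2 := by push_cast; ring
      rw [hc]
      simp only [h1, h2, if_pos, if_neg, dif_pos, not_false_iff]
      have hshift : ((k : Int) + 2 - 2) = ((k : Nat) : Int) := by push_cast; ring
      rw [hshift, ih k (by omega)]
      -- now: sum + (k+2)*B*4 + rem k (B+2) = sum + rem (k+2) B
      unfold bishopRem
      have hJ : ((k + 2 + 1) / 2) = (k + 1) / 2 + 1 := by omega
      rw [hJ, Finset.sum_range_succ']
      have hpar : (k + 2) % 2 = k % 2 := by omega
      rw [hpar]
      push_cast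
      by_cases hk : k % 2 = 0 <;>
        simp only [hk, if_pos, if_neg, Nat.one_ne_zero, reduceIte] <;>
        rw [Finset.sum_congr rfl (fun (j : ℕ) _ => by push_cast; ring :
          ∀ j ∈ Finset.range ((k + 1) / 2),
            ((k:Int) + 2 - 2 * ((j:Int) + 1)) * (B + 2 * ((j:Int) + 1))
              = ((k:Int) - 2 * j) * ((B + 2) + 2 * j))] <;>
        push_cast <;> ring

-- Sum of squares (times 6), avoiding division.
theorem six_mul_sum_sq (n : Nat) :
    6 * (∑ j ∈ Finset.range n, (j : Int) * j) = ((n : Int) - 1) * n * (2 * n - 1) := by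
  induction n with
  | zero => simp
  | succ m ih =>
    rw [Finset.sum_range_succ, mul_add, ih]
    push_cast
    ring

theorem bishop_clausules_count_spec : Claim_equal_bishop_clausules_count := by
  intro N _
  unfold Spec_bishop_clausules_count bishop_clausules_count bishop_clausules_count_alt
  by_cases hneg : N - 1 < 0
  · rw [bishopLoopA]
    simp [hneg]
    omega
  · -- N - 1 ≥ 0 : set a := (N-1).toNat
    push_neg at hneg
    set a : Nat := (N - 1).toNat with ha
    have hcast : ((a : Int)) = N - 1 := by omega
    rw [← hcast]
    rw [bishopLoopA_eq_rem a (a : Int) 0, zero_add]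
    simp only [if_neg (by omega : ¬ ((a:Int) < 0))]
    -- rewrite floordivs
    have hJ : PySem.Int.floordiv ((a : Int) + 1) 2 = (((a + 1) / 2 : Nat) : Int) := by
      rw [PySem.Int.floordiv_eq_ediv_of_pos (by norm_num)]
      omega
    set J : Nat := (a + 1) / 2 with hJdef
    have hsix : (((J : Int) - 1) * J * (2 * J - 1)) = 6 * (∑ j ∈ Finset.range J, (j : Int) * j) :=
      (six_mul_sum_sq J).symm
    have hfd : PySem.Int.floordiv (((J : Int) - 1) * J * (2 * J - 1)) 6
        = ∑ j ∈ Finset.range J, (j : Int) * j := by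
      rw [hsix, PySem.Int.floordiv_eq_ediv_of_pos (by norm_num)]
      exact Int.mul_ediv_cancel_left _ (by norm_num)
    rw [hJ, hfd]
    have hmod : PySem.Int.mod (a : Int) 2 = ((a % 2 : Nat) : Int) := by
      rw [PySem.Int.mod_eq_emod_of_pos (by norm_num)]
      omega
    unfold bishopRem
    rw [hmod]
    -- expand the sum: (a - 2j)(a + 2j) = a*a - 4 j*j
    have hterm : (∑ j ∈ Finset.range J, ((a : Int) - 2 * j) * ((a : Int) + 2 * j))
        = J * ((a:Int) * a) - 4 * (∑ j ∈ Finset.range J, (j : Int) * j) := by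
      rw [Finset.sum_congr rfl (fun j _ => by ring_nf : ∀ j ∈ Finset.range J,
        ((a : Int) - 2 * j) * ((a : Int) + 2 * j) = (a:Int) * a - 4 * ((j:Int) * j))]
      rw [Finset.sum_sub_distrib, Finset.sum_const, Finset.card_range, Finset.mul_sum]
      push_cast; ring
    rw [hterm]
    by_cases hp : a % 2 = 0
    · simp only [hp, Nat.cast_zero, if_pos rfl, if_pos]
      push_cast
      ring
    · have hp1 : a % 2 = 1 := by omega
      simp only [hp1]
      norm_num
      push_cast
      ring

-- ===== VERDICT (by name: the statement is the Claim_ definition above) =====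
-- (bishop_clausules_count_spec proved above)
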